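-- pv_equiv track=rewrite | github.com/joe-down/project-euler-python | main/11-largest-product-in-a-grid.py | find_horizontals_product
-- ===== SOURCE A (Python) =====
-- def find_horizontals_product(grid: tuple, height: int, width: int, adjacent_length: int) -> int:
--     greatest_product: int = 0
--     for x_start_coordinate in range(0, width - adjacent_length + 1):
--         for y_coordinate in range(0, height):
--             adjacent_product: int = grid[y_coordinate][x_start_coordinate]
--             for x_coordinate in range(x_start_coordinate+1, x_start_coordinate + adjacent_length):
--                 adjacent_product *= grid[y_coordinate][x_coordinate]
--             if adjacent_product > greatest_product:
--                 greatest_product: int = adjacent_product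
--     return greatest_product
-- ===== SOURCE B (Python) =====
-- def find_horizontals_product(grid, height, width, adjacent_length):
--     best = 0
--     n_windows = width - adjacent_length + 1
--     if n_windows <= 0:
--         return 0
--     for y in range(height):
--         row = grid[y]
--         product = 1
--         zeros = 0
--         for i in range(adjacent_length):
--             v = row[i]
--             if v == 0:
--                 zeros += 1
--             else:
--                 product *= v
--         window = product if zeros == 0 else 0
--         if window > best:
--             best = window
--         for s in range(1, n_windows):
--             out_v = row[s - 1]
--             if out_v == 0:
--                 zeros -= 1
--             else:
--                 product //= out_v
--             in_v = row[s + adjacent_length - 1]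
--             if in_v == 0:
--                 zeros += 1
--             else:
--                 product *= in_v
--             window = product if zeros == 0 else 0
--             if window > best:
--                 best = window
--     return best
-- ===== Notes on version B (the rewrite author's own statement) =====
-- stated objective: alternative
-- what changed: Replaces A's per-window recomputation (product of adjacent_length cells for every window, column-major) by a single row-major sliding-window pass per row that maintains a running product of the nonzero cells plus a zero counter, dividing out the leaving cell and multiplying in the entering cell. Pre_ excludes inputs where A raises IndexError, and non-positive adjacent_length when windows and rows exist — a degenerate window length on which A's single-cell read and B's empty-window values are both accidental.
-- outside the precondition, e.g. on find_horizontals_product([[3, 4]], 1, 1, 0): A returns 4, B returns 1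
import Mathlib
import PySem

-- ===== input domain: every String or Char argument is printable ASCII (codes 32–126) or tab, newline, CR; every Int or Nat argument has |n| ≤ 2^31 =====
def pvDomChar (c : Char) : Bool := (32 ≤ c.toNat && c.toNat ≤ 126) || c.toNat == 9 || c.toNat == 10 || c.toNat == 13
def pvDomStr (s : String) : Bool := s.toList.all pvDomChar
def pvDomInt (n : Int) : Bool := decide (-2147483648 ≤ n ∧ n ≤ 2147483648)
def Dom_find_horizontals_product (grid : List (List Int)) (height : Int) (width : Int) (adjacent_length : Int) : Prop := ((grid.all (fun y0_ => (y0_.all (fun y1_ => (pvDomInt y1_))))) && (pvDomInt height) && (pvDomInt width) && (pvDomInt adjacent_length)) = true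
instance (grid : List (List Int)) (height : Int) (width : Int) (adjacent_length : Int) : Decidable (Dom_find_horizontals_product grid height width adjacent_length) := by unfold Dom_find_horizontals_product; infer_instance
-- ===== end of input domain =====

-- B (alternative algorithm): instead of recomputing each window's product cell by cell as A
-- does, B slides one window along each row, keeping a running product of the nonzero cells and
-- a zero counter; proved equal to A on Pre_ (no claim about speed is made).

-- ===== PORT A =====
-- grid[y] / row[i]; the defaults are never used on inputs satisfying Pre_ (all accesses in range)
def pvRowOf (grid : List (List Int)) (y : Int) : List Int := PySem.List.pyGetD grid y []
def pvCellOf (row : List Int) (i : Int) : Int := PySem.List.pyGetD row i 0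

def find_horizontals_product (grid : List (List Int)) (height : Int) (width : Int) (adjacent_length : Int) : Int :=
  (PySem.List.pyRange 0 (width - adjacent_length + 1) 1).foldl (fun greatest x_start =>
    (PySem.List.pyRange 0 height 1).foldl (fun greatest y =>
      let adjacent_product :=
        (PySem.List.pyRange (x_start + 1) (x_start + adjacent_length) 1).foldl
          (fun p xc => p * pvCellOf (pvRowOf grid y) xc) (pvCellOf (pvRowOf grid y) x_start)
      if adjacent_product > greatest then adjacent_product else greatest) greatest) 0

-- ===== PORT B =====
def find_horizontals_product_alt (grid : List (List Int)) (height : Int) (width : Int) (adjacent_length : Int) : Int :=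
  let nWindows := width - adjacent_length + 1
  if nWindows ≤ 0 then 0 else
  (PySem.List.pyRange 0 height 1).foldl (fun best y =>
    let row := pvRowOf grid y
    let pz := (PySem.List.pyRange 0 adjacent_length 1).foldl
      (fun (pz : Int × Int) i =>
        let v := pvCellOf row i
        if v = 0 then (pz.1, pz.2 + 1) else (pz.1 * v, pz.2)) (1, 0)
    let w0 := if pz.2 = 0 then pz.1 else 0
    let best1 := if w0 > best then w0 else best
    ((PySem.List.pyRange 1 nWindows 1).foldl
      (fun (st : Int × Int × Int) s =>
        let ov := pvCellOf row (s - 1)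
        let pz1 := if ov = 0 then (st.2.1, st.2.2 - 1)
                   else (PySem.Int.floordiv st.2.1 ov, st.2.2)
        let iv := pvCellOf row (s + adjacent_length - 1)
        let pz2 := if iv = 0 then (pz1.1, pz1.2 + 1) else (pz1.1 * iv, pz1.2)
        let w := if pz2.2 = 0 then pz2.1 else 0
        (if w > st.1 then w else st.1, pz2)) (best1, pz)).1) 0

-- ===== PRECONDITION & SPEC =====
-- Pre_ excludes (a) inputs where A raises IndexError (a row shorter than the indices the scan
-- reaches), and (b) non-positive adjacent_length when window positions and rows both exist, a
-- degenerate window length on which no window product is specified: there A reads a single cell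
-- at positions beyond width while B's empty windows give equally accidental values — both are
-- artefacts nobody would specify.
def Pre_find_horizontals_product (grid : List (List Int)) (height : Int) (width : Int) (adjacent_length : Int) : Prop :=
  width - adjacent_length + 1 ≤ 0 ∨ height ≤ 0 ∨
  (1 ≤ adjacent_length ∧ height ≤ (grid.length : Int) ∧
    ∀ row ∈ grid.take height.toNat, width ≤ (row.length : Int))
instance (grid : List (List Int)) (height : Int) (width : Int) (adjacent_length : Int) : Decidable (Pre_find_horizontals_product grid height width adjacent_length) := by unfold Pre_find_horizontals_product; infer_instance

def pvWitness_find_horizontals_product : List (List Int) × Int × Int × Int :=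
  ([[1, 2, 0], [3, -4, 5]], 2, 3, 2)

def Spec_find_horizontals_product (grid : List (List Int)) (height : Int) (width : Int) (adjacent_length : Int) (out : Int) : Prop := out = find_horizontals_product_alt grid height width adjacent_length
instance (grid : List (List Int)) (height : Int) (width : Int) (adjacent_length : Int) (out : Int) : Decidable (Spec_find_horizontals_product grid height width adjacent_length out) := by unfold Spec_find_horizontals_product; infer_instance

-- ===== CLAIM (what is proved, stated in full; the proofs are below) =====
def Claim_equal_find_horizontals_product : Prop := ∀ (grid : List (List Int)) (height : Int) (width : Int) (adjacent_length : Int), Dom_find_horizontals_product grid height width adjacent_length → Pre_find_horizontals_product grid height width adjacent_length → Spec_find_horizontals_product grid height width adjacent_length (find_horizontals_product grid height width adjacent_length)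

-- ===== LEMMAS AND PROOFS =====

-- window product of length L starting at (Nat) position s of row r
def pvWin (r : List Int) (s n : Nat) : List Int := (r.drop s).take n
def pvNz (w : List Int) : Int := (w.filter (fun v => v ≠ 0)).prod

-- generic fold facts ------------------------------------------------------
theorem pv_foldl_max_flat {γ : Type} (Xs : List γ) (f : γ → List Int) (a : Int) :
    Xs.foldl (fun a x => (f x).foldl max a) a = (Xs.flatMap f).foldl max a := by
  induction Xs generalizing a with
  | nil => rfl
  | cons x xs ih => simp [List.flatMap_cons, List.foldl_append, ih]

theorem pv_flatMap_cons_perm {γ : Type} (Ys : List γ) (c : γ → Int) (g : γ → List Int) :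
    (Ys.flatMap fun y => c y :: g y).Perm (Ys.map c ++ Ys.flatMap g) := by
  induction Ys with
  | nil => simp
  | cons y ys ih =>
    simp only [List.flatMap_cons, List.map_cons, List.cons_append]
    refine List.Perm.cons _ ?_
    have h1 : (g y ++ ys.flatMap fun y => c y :: g y).Perm
        (g y ++ (ys.map c ++ ys.flatMap g)) := List.Perm.append_left _ ih
    have h2 : ((g y ++ ys.map c) ++ ys.flatMap g).Perm
        ((ys.map c ++ g y) ++ ys.flatMap g) := List.perm_append_comm.append_right _
    exact h1.trans (by simpa [List.append_assoc] using h2)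

theorem pv_transpose_perm {γ δ : Type} (Xs : List γ) (Ys : List δ) (P : γ → δ → Int) :
    (Xs.flatMap fun x => Ys.map (P x)).Perm (Ys.flatMap fun y => Xs.map (fun x => P x y)) := by
  induction Xs with
  | nil => simp
  | cons x xs ih =>
    simp only [List.flatMap_cons, List.map_cons]
    exact (List.Perm.append_left _ ih).trans
      (pv_flatMap_cons_perm Ys (fun y => P x y) _).symm

theorem pv_foldl_mul (l : List Int) (p : Int) : l.foldl (fun a b => a * b) p = p * l.prod := by
  induction l generalizing p with
  | nil => simp
  | cons x xs ih => simp [ih, mul_assoc]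

-- segment of a row indexed by a pyRange ----------------------------------
theorem pv_segMap (r : List Int) (a n : Nat) (h : a + n ≤ r.length) :
    (PySem.List.pyRange (a : Int) ((a : Int) + (n : Int)) 1).map (fun i => pvCellOf r i) =
      (r.drop a).take n := by
  induction n generalizing a with
  | zero => simp [PySem.List.pyRange_one_eq_nil]
  | succ m ih =>
    rw [PySem.List.pyRange_one_cons (by omega : (a : Int) < (a : Int) + ((m : Nat) + 1 : Nat))]
    have ha : a < r.length := by omega
    have h1 : ((a : Int) + 1) = ((a + 1 : Nat) : Int) := by push_cast; ring
    have h2 : ((a : Int) + ((m + 1 : Nat) : Int)) = ((a + 1 : Nat) : Int) + (m : Int) := by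
      push_cast; ring
    rw [List.map_cons, h1, h2, ih (a + 1) (by omega)]
    rw [List.drop_eq_getElem_cons ha, List.take_succ_cons]
    congr 1
    simp [pvCellOf, PySem.List.pyGetD_natCast, List.getD, ha]

-- zero/nonzero bookkeeping over a list -----------------------------------
theorem pv_nzfold (w : List Int) (p z : Int) :
    w.foldl (fun (pz : Int × Int) v =>
        if v = 0 then (pz.1, pz.2 + 1) else (pz.1 * v, pz.2)) (p, z) =
      (p * pvNz w, z + (w.count 0 : Int)) := by
  induction w generalizing p z with
  | nil => simp [pvNz]
  | cons v vs ih =>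
    by_cases hv : v = 0
    · subst hv
      simp [ih, pvNz, List.count_cons]
      omega
    · simp [hv, ih, pvNz, mul_assoc]

theorem pv_win_value (w : List Int) :
    (if ((w.count 0 : Int)) = 0 then pvNz w else 0) = w.prod := by
  by_cases h : (0 : Int) ∈ w
  · have hc : w.count 0 ≠ 0 := by
      have := List.count_pos_iff.mpr h
      omega
    rw [if_neg (by exact_mod_cast hc)]
    exact (List.prod_eq_zero h).symm
  · have hc : w.count 0 = 0 := List.count_eq_zero.mpr h
    rw [if_pos (by exact_mod_cast hc)]
    have hf : w.filter (fun v => v ≠ 0) = w := by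
      rw [List.filter_eq_self]
      intro a ha
      simp only [ne_eq, decide_eq_true_eq]
      rintro rfl
      exact h ha
    unfold pvNz
    rw [hf]

-- window decompositions ---------------------------------------------------
theorem pv_win_cons (r : List Int) (s n : Nat) (hs : s < r.length) (hn : 1 ≤ n) :
    pvWin r s n = r[s] :: (r.drop (s + 1)).take (n - 1) := by
  obtain ⟨m, rfl⟩ : ∃ m, n = m + 1 := ⟨n - 1, by omega⟩
  unfold pvWin
  rw [List.drop_eq_getElem_cons hs, List.take_succ_cons]
  simp

theorem pv_win_snoc (r : List Int) (s n : Nat) (hs : s + n ≤ r.length) (hn : 1 ≤ n) :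
    pvWin r s n = (r.drop s).take (n - 1) ++ [r[s + (n - 1)]'(by omega)] := by
  obtain ⟨m, rfl⟩ : ∃ m, n = m + 1 := ⟨n - 1, by omega⟩
  unfold pvWin
  rw [List.take_add_one]
  congr 1
  rw [List.getElem?_drop]
  simp [List.getElem?_eq_getElem (by omega : s + m < r.length)]

-- A's inner loop computes the window product ------------------------------
theorem pv_A_inner (r : List Int) (x L : Int) (hx : 0 ≤ x) (hL : 1 ≤ L)
    (hlen : x + L ≤ (r.length : Int)) :
    (PySem.List.pyRange (x + 1) (x + L) 1).foldl
        (fun p xc => p * pvCellOf r xc) (pvCellOf r x) =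
      (pvWin r x.toNat L.toNat).prod := by
  have ha : x.toNat < r.length := by omega
  have hx1 : x + 1 = ((x.toNat + 1 : Nat) : Int) := by omega
  have hx2 : x + L = ((x.toNat + 1 : Nat) : Int) + ((L.toNat - 1 : Nat) : Int) := by omega
  rw [hx1, hx2, ← List.foldl_map (f := fun i => pvCellOf r i) (g := fun a b => a * b),
    pv_segMap r (x.toNat + 1) (L.toNat - 1) (by omega), pv_foldl_mul]
  have hcell : pvCellOf r x = r[x.toNat] := by
    unfold pvCellOf
    rw [PySem.List.pyGetD_eq_getElem r 0 (by omega) (by omega)]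
  rw [pv_win_cons r x.toNat L.toNat ha (by omega), List.prod_cons, hcell]

-- B's initial window fold --------------------------------------------------
theorem pv_B_init (r : List Int) (L : Int) (hL : 1 ≤ L) (hlen : L ≤ (r.length : Int)) :
    (PySem.List.pyRange 0 L 1).foldl
        (fun (pz : Int × Int) i =>
          let v := pvCellOf r i
          if v = 0 then (pz.1, pz.2 + 1) else (pz.1 * v, pz.2)) (1, 0) =
      (pvNz (pvWin r 0 L.toNat), ((pvWin r 0 L.toNat).count 0 : Int)) := by
  have hseg : (PySem.List.pyRange 0 L 1).map (fun i => pvCellOf r i) = r.take L.toNat := by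
    have h := pv_segMap r 0 L.toNat (by omega)
    rw [show ((0 : Nat) : Int) + ((L.toNat : Nat) : Int) = L by omega] at h
    simpa using h
  show (PySem.List.pyRange 0 L 1).foldl
      (fun (pz : Int × Int) i =>
        if pvCellOf r i = 0 then (pz.1, pz.2 + 1) else (pz.1 * pvCellOf r i, pz.2)) (1, 0) = _
  rw [← List.foldl_map (f := fun i => pvCellOf r i)
      (g := fun (pz : Int × Int) v => if v = 0 then (pz.1, pz.2 + 1) else (pz.1 * v, pz.2)),
    hseg, pv_nzfold]
  unfold pvWin
  simp

-- sliding step: window s-1 → window s -------------------------------------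
theorem pv_nz_cons (v : Int) (m : List Int) :
    pvNz (v :: m) = if v = 0 then pvNz m else v * pvNz m := by
  by_cases hv : v = 0 <;> simp [pvNz, List.filter_cons, hv]

theorem pv_nz_append (m : List Int) (v : Int) :
    pvNz (m ++ [v]) = if v = 0 then pvNz m else pvNz m * v := by
  by_cases hv : v = 0 <;> simp [pvNz, List.filter_append, List.filter_cons, hv]

theorem pv_floordiv_cancel (v q : Int) (hv : v ≠ 0) :
    PySem.Int.floordiv (v * q) v = q := by
  simp [PySem.Int.floordiv, Int.mul_fdiv_cancel_left _ hv]

-- the per-row sliding loop -------------------------------------------------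
-- the sliding-step function of port B, named so the fold steps stay un-reduced in proofs
def pvStep (r : List Int) (L : Int) (st : Int × Int × Int) (s : Int) : Int × Int × Int :=
  let ov := pvCellOf r (s - 1)
  let pz1 := if ov = 0 then (st.2.1, st.2.2 - 1)
             else (PySem.Int.floordiv st.2.1 ov, st.2.2)
  let iv := pvCellOf r (s + L - 1)
  let pz2 := if iv = 0 then (pz1.1, pz1.2 + 1) else (pz1.1 * iv, pz1.2)
  let w := if pz2.2 = 0 then pz2.1 else 0
  (if w > st.1 then w else st.1, pz2)

theorem pv_if_max (b w : Int) : (if w > b then w else b) = max b w := by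
  split_ifs with h
  · exact (max_eq_right h.le).symm
  · exact (max_eq_left (by omega)).symm

theorem pv_B_slide_aux (r : List Int) (L W : Int) (hL : 1 ≤ L)
    (hlen : W - 1 + L ≤ (r.length : Int)) :
    ∀ (n : Nat) (t b : Int), 1 ≤ t → t ≤ W → (W - t).toNat = n →
    ((PySem.List.pyRange t W 1).foldl
      (pvStep r L)
      (b, pvNz (pvWin r (t-1).toNat L.toNat), ((pvWin r (t-1).toNat L.toNat).count 0 : Int))).1 =
      ((PySem.List.pyRange t W 1).map
        (fun s => (pvWin r s.toNat L.toNat).prod)).foldl max b := by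
  intro n
  induction n with
  | zero =>
    intro t b ht htW hn
    rw [PySem.List.pyRange_one_eq_nil (by omega)]
    simp
  | succ m ih =>
    intro t b ht htW hn
    have htW' : t < W := by omega
    have hi1 : (t - 1).toNat < r.length := by omega
    have hi2 : t.toNat + L.toNat ≤ r.length := by omega
    have hov : pvCellOf r (t - 1) = r[(t - 1).toNat] := by
      unfold pvCellOf
      rw [PySem.List.pyGetD_eq_getElem r 0 (by omega) (by omega)]
    have hidx : (t + L - 1).toNat = t.toNat + (L.toNat - 1) := by omega
    have hiv : pvCellOf r (t + L - 1) = r[t.toNat + (L.toNat - 1)]'(by omega) := by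
      unfold pvCellOf
      rw [PySem.List.pyGetD_eq_getElem r 0 (by omega) (by omega)]
      simp only [hidx]
    have hprev : pvWin r (t - 1).toNat L.toNat
        = r[(t - 1).toNat] :: (r.drop t.toNat).take (L.toNat - 1) := by
      rw [pv_win_cons r (t - 1).toNat L.toNat hi1 (by omega),
        show (t - 1).toNat + 1 = t.toNat from by omega]
    have hcur : pvWin r t.toNat L.toNat
        = (r.drop t.toNat).take (L.toNat - 1) ++ [r[t.toNat + (L.toNat - 1)]'(by omega)] :=
      pv_win_snoc r t.toNat L.toNat hi2 (by omega)
    have harg :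
        pvStep r L
          (b, pvNz (pvWin r (t-1).toNat L.toNat), ((pvWin r (t-1).toNat L.toNat).count 0 : Int)) t
        = (max b ((pvWin r t.toNat L.toNat).prod),
            pvNz (pvWin r t.toNat L.toNat), ((pvWin r t.toNat L.toNat).count 0 : Int)) := by
      unfold pvStep
      dsimp only
      rw [hov, hiv, hprev, hcur]
      set mid := (r.drop t.toNat).take (L.toNat - 1) with hmid
      set a := r[(t - 1).toNat] with ha0
      set c := r[t.toNat + (L.toNat - 1)]'(by omega : t.toNat + (L.toNat - 1) < r.length) with hc0
      rw [← pv_win_value (mid ++ [c]), ← pv_if_max, pv_nz_cons, pv_nz_append,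
        List.count_cons, List.count_append]
      by_cases h1 : a = 0
      · by_cases h2 : c = 0 <;>
          simp [h1, h2] <;> push_cast <;> omega
      · by_cases h2 : c = 0 <;>
          simp [h1, h2, pv_floordiv_cancel a (pvNz mid) h1] <;> push_cast <;> omega
    rw [PySem.List.pyRange_one_cons htW', List.foldl_cons, List.map_cons, List.foldl_cons, harg]
    have := ih (t + 1) (max b ((pvWin r t.toNat L.toNat).prod)) (by omega) (by omega) (by omega)
    simpa [show t + 1 - 1 = t from by omega] using this

theorem pv_B_slide (r : List Int) (L W : Int) (hL : 1 ≤ L)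
    (hlen : W - 1 + L ≤ (r.length : Int)) (t b : Int) (ht : 1 ≤ t) (htW : t ≤ W) :
    ((PySem.List.pyRange t W 1).foldl
      (pvStep r L)
      (b, pvNz (pvWin r (t-1).toNat L.toNat), ((pvWin r (t-1).toNat L.toNat).count 0 : Int))).1 =
      ((PySem.List.pyRange t W 1).map
        (fun s => (pvWin r s.toNat L.toNat).prod)).foldl max b :=
  pv_B_slide_aux r L W hL hlen _ t b ht htW rfl

-- A's value as a fold of max over all window products ----------------------
theorem pv_A_char (grid : List (List Int)) (h w L : Int) (hL : 1 ≤ L)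
    (hh : h ≤ (grid.length : Int))
    (hrows : ∀ row ∈ grid.take h.toNat, w ≤ (row.length : Int)) :
    find_horizontals_product grid h w L =
      ((PySem.List.pyRange 0 (w - L + 1) 1).flatMap (fun x =>
        (PySem.List.pyRange 0 h 1).map (fun y =>
          (pvWin (pvRowOf grid y) x.toNat L.toNat).prod))).foldl max 0 := by
  unfold find_horizontals_product
  rw [← pv_foldl_max_flat]
  apply PySem.List.foldl_congr_mem
  intro g x hx
  rw [List.foldl_map]
  apply PySem.List.foldl_congr_mem
  intro g' y hy
  rw [PySem.List.mem_pyRange_one] at hx hy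
  have hyl : y.toNat < grid.length := by omega
  have hrow : pvRowOf grid y = grid[y.toNat] := by
    unfold pvRowOf
    rw [PySem.List.pyGetD_eq_getElem grid [] (by omega) (by omega)]
  have hmem : grid[y.toNat] ∈ grid.take h.toNat := by
    have hy' : y.toNat < (grid.take h.toNat).length := by
      simp only [List.length_take]
      omega
    have he : (grid.take h.toNat)[y.toNat] = grid[y.toNat] := List.getElem_take
    exact he ▸ List.getElem_mem hy'
  have hwlen : w ≤ ((grid[y.toNat]).length : Int) := hrows _ hmem
  dsimp only
  rw [hrow, pv_A_inner (grid[y.toNat]) x L (by omega) hL (by omega), pv_if_max]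

-- B's value as a fold of max over all window products ----------------------
theorem pv_B_char (grid : List (List Int)) (h w L : Int) (hL : 1 ≤ L) (hW : 1 ≤ w - L + 1)
    (hh : h ≤ (grid.length : Int))
    (hrows : ∀ row ∈ grid.take h.toNat, w ≤ (row.length : Int)) :
    find_horizontals_product_alt grid h w L =
      ((PySem.List.pyRange 0 h 1).flatMap (fun y =>
        (PySem.List.pyRange 0 (w - L + 1) 1).map (fun x =>
          (pvWin (pvRowOf grid y) x.toNat L.toNat).prod))).foldl max 0 := by
  unfold find_horizontals_product_alt
  rw [if_neg (by omega)]
  rw [← pv_foldl_max_flat]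
  apply PySem.List.foldl_congr_mem
  intro best y hy
  rw [PySem.List.mem_pyRange_one] at hy
  have hyl : y.toNat < grid.length := by omega
  have hrow : pvRowOf grid y = grid[y.toNat] := by
    unfold pvRowOf
    rw [PySem.List.pyGetD_eq_getElem grid [] (by omega) (by omega)]
  have hmem : grid[y.toNat] ∈ grid.take h.toNat := by
    have hy' : y.toNat < (grid.take h.toNat).length := by
      simp only [List.length_take]
      omega
    have he : (grid.take h.toNat)[y.toNat] = grid[y.toNat] := List.getElem_take
    exact he ▸ List.getElem_mem hy'
  have hwlen : w ≤ ((grid[y.toNat]).length : Int) := hrows _ hmem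
  dsimp only
  rw [show (fun (st : Int × Int × Int) s =>
        let ov := pvCellOf (pvRowOf grid y) (s - 1)
        let pz1 := if ov = 0 then (st.2.1, st.2.2 - 1)
                   else (PySem.Int.floordiv st.2.1 ov, st.2.2)
        let iv := pvCellOf (pvRowOf grid y) (s + L - 1)
        let pz2 := if iv = 0 then (pz1.1, pz1.2 + 1) else (pz1.1 * iv, pz1.2)
        let w := if pz2.2 = 0 then pz2.1 else 0
        (if w > st.1 then w else st.1, pz2)) = pvStep (pvRowOf grid y) L from rfl]
  rw [hrow, pv_B_init (grid[y.toNat]) L hL (by omega), pv_win_value, pv_if_max]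
  have hs := pv_B_slide (grid[y.toNat]) L (w - L + 1) hL (by omega) 1
    (max best ((pvWin (grid[y.toNat]) 0 L.toNat).prod)) (by omega) (by omega)
  norm_num at hs
  rw [hs, PySem.List.pyRange_one_cons (show (0 : Int) < w - L + 1 by omega),
    List.map_cons, List.foldl_cons]
  norm_num

-- ===== VERDICT (by name: the statement is the Claim_ definition above) =====
theorem find_horizontals_product_spec : Claim_equal_find_horizontals_product := by
  intro grid h w L _hDom hPre
  unfold Spec_find_horizontals_product
  rcases hPre with hW | hh0 | ⟨hL, hh, hrows⟩
  · -- no windows: both 0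
    unfold find_horizontals_product find_horizontals_product_alt
    rw [show PySem.List.pyRange 0 (w - L + 1) 1 = [] from PySem.List.pyRange_one_eq_nil (by omega)]
    simp [hW]
  · -- no rows
    by_cases hW : w - L + 1 ≤ 0
    · unfold find_horizontals_product find_horizontals_product_alt
      rw [show PySem.List.pyRange 0 (w - L + 1) 1 = [] from PySem.List.pyRange_one_eq_nil (by omega)]
      simp [hW]
    · unfold find_horizontals_product find_horizontals_product_alt
      rw [show PySem.List.pyRange 0 h 1 = [] from PySem.List.pyRange_one_eq_nil (by omega)]
      simp only [List.foldl_nil]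
      simp [hW]
  · by_cases hW : w - L + 1 ≤ 0
    · unfold find_horizontals_product find_horizontals_product_alt
      rw [show PySem.List.pyRange 0 (w - L + 1) 1 = [] from PySem.List.pyRange_one_eq_nil (by omega)]
      simp [hW]
    · rw [pv_A_char grid h w L hL hh hrows,
        pv_B_char grid h w L hL (by omega) hh hrows]
      exact (pv_transpose_perm _ _ _).foldl_eq 0
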